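-- pv_equiv track=rewrite | github.com/MightyPixel/algorithms | Interviews/Company_2/problem_03.py | get_unsorted_groups
-- ===== SOURCE A (Python) =====
-- def get_unsorted_groups(xs):
--     unsorted_groups = []
--
--     j = 0
--     for i in range(len(xs) - 1):
--         if xs[i] < xs[i+1]:
--             unsorted_groups.append(xs[j:i+1])
--             j = i + 1
--
--     unsorted_groups.append(xs[j:])
--
--     return unsorted_groups
-- ===== SOURCE B (Python) =====
-- def get_unsorted_groups(xs):
--     if not xs:
--         return [[]]
--     groups = []
--     cur = [xs[-1]]
--     for i in range(len(xs) - 2, -1, -1):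
--         if xs[i] < xs[i + 1]:
--             groups.append(cur)
--             cur = [xs[i]]
--         else:
--             cur = [xs[i]] + cur
--     groups.append(cur)
--     groups.reverse()
--     return groups
-- ===== Notes on version B (the rewrite author's own statement) =====
-- stated objective: alternative
-- what changed: Replaces A's forward index scan that slices the list between a mutable cursor and each ascending boundary with a backward element-by-element traversal that builds each group by consing elements onto the current group (no index slicing at all), collecting groups back-to-front and reversing once at the end.
import Mathlib
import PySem

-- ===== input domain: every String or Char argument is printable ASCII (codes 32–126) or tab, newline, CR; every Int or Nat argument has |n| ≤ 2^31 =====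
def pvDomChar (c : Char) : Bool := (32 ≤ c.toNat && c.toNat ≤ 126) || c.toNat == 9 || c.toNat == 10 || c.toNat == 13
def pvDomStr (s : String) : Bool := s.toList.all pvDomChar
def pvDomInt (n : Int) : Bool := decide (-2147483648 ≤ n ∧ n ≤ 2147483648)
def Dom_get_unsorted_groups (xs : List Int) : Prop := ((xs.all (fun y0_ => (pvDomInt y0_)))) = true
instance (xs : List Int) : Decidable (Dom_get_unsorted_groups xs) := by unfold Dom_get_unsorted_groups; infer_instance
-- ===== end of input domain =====

-- B replaces A's forward cursor-and-slice scan with a backward element-consing traversal (groups built by consing, collected back-to-front, reversed once); alternative decomposition, same cost.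


-- ===== PORT A =====
-- literal transliteration of A: one forward scan with accumulator list and cursor j, slicing xs[j:i+1]
def get_unsorted_groups (xs : List Int) : List (List Int) :=
  let st := (PySem.List.pyRange 0 (PySem.List.len xs - 1) 1).foldl
    (fun (st : List (List Int) × Int) i =>
      if PySem.List.pyGetD xs i 0 < PySem.List.pyGetD xs (i+1) 0 then
        (st.1 ++ [PySem.List.slice xs (some st.2) (some (i+1))], i+1)
      else st) ([], 0)
  st.1 ++ [PySem.List.slice xs (some st.2) none]

-- ===== PORT B =====
-- literal transliteration of B: backward traversal; each group is built by consing elements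
-- onto the current group, closed groups are collected back-to-front, one reverse at the end
def get_unsorted_groups_alt (xs : List Int) : List (List Int) :=
  if xs = [] then [[]]
  else
    let st := (PySem.List.pyRange (PySem.List.len xs - 2) (-1) (-1)).foldl
      (fun (st : List (List Int) × List Int) i =>
        if PySem.List.pyGetD xs i 0 < PySem.List.pyGetD xs (i+1) 0 then
          (st.1 ++ [st.2], [PySem.List.pyGetD xs i 0])
        else (st.1, PySem.List.pyGetD xs i 0 :: st.2))
      ([], [PySem.List.pyGetD xs (-1) 0])
    (st.1 ++ [st.2]).reverse

-- ===== PRECONDITION & SPEC =====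
def Spec_get_unsorted_groups (xs : List Int) (out : List (List Int)) : Prop := out = get_unsorted_groups_alt xs
instance (xs : List Int) (out : List (List Int)) : Decidable (Spec_get_unsorted_groups xs out) := by unfold Spec_get_unsorted_groups; infer_instance

-- ===== CLAIM (what is proved, stated in full; the proofs are below) =====
def Claim_equal_get_unsorted_groups : Prop := ∀ (xs : List Int), Dom_get_unsorted_groups xs → Spec_get_unsorted_groups xs (get_unsorted_groups xs)

-- ===== LEMMAS AND PROOFS =====

-- the common structural spec: groups by recursion on the list
def pvG : List Int → List (List Int)
  | [] => [[]]
  | [x] => [[x]]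
  | x :: y :: rest =>
      match pvG (y :: rest) with
      | [] => [[x]]   -- unreachable: pvG never returns []
      | g :: gs => if x < y then [x] :: g :: gs else (x :: g) :: gs

-- ---- generic shift lemmas ----

lemma pvGetD_shift (x : Int) (t : List Int) (i : Int) (h : 0 ≤ i) :
    PySem.List.pyGetD (x :: t) (i + 1) 0 = PySem.List.pyGetD t i 0 := by
  obtain ⟨n, rfl⟩ := Int.eq_ofNat_of_zero_le h
  have : ((n : Int) + 1) = ((n + 1 : Nat) : Int) := by push_cast; ring
  rw [this, PySem.List.pyGetD_natCast, PySem.List.pyGetD_natCast]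
  simp

lemma pvSlice_shift (x : Int) (t : List Int) (a b : Int) (ha : 0 ≤ a) (hb : 0 ≤ b) :
    PySem.List.slice (x :: t) (some (a + 1)) (some (b + 1)) = PySem.List.slice t (some a) (some b) := by
  rw [PySem.List.slice_toNat _ (by omega) (by omega), PySem.List.slice_toNat _ ha hb]
  have ha1 : (a + 1).toNat = a.toNat + 1 := by omega
  have hb1 : (b + 1).toNat = b.toNat + 1 := by omega
  rw [ha1, hb1]
  simp [List.drop_succ_cons]

lemma pvRange_up_shift (a b : Int) :
    PySem.List.pyRange (a + 1) (b + 1) 1 = (PySem.List.pyRange a b 1).map (· + 1) := by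
  rw [PySem.List.pyRange_one, PySem.List.pyRange_one, List.map_map]
  have : (b + 1 - (a + 1)) = b - a := by ring
  rw [this]
  apply List.map_congr_left
  intro k _
  simp; ring

lemma pvRange_down_shift (a : Int) :
    PySem.List.pyRange (a + 1) 0 (-1) = (PySem.List.pyRange a (-1) (-1)).map (· + 1) := by
  rw [PySem.List.pyRange_neg_one, PySem.List.pyRange_neg_one, List.map_map]
  have : (a + 1 - 0) = a - (-1) := by ring
  rw [this]
  apply List.map_congr_left
  intro k _
  simp; ring

-- ---- part A:  port of A = pvZ  (cut indices + zip slicing characterisation) ----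

def pvKs (xs L : List Int) : List Int :=
  L.filterMap (fun i => if PySem.List.pyGetD xs i 0 < PySem.List.pyGetD xs (i+1) 0 then some (i+1) else none)

def pvCuts (xs : List Int) : List Int :=
  pvKs xs (PySem.List.pyRange 0 (PySem.List.len xs - 1) 1) ++ [PySem.List.len xs]

def pvZ (xs : List Int) : List (List Int) :=
  (((0 : Int) :: pvCuts xs).zip (pvCuts xs)).map (fun p => PySem.List.slice xs (some p.1) (some p.2))

def pvLastD (d : Int) : List Int → Int
  | [] => d
  | x :: l => pvLastD x l

lemma pvLastD_cases (d : Int) (l : List Int) : pvLastD d l = d ∨ pvLastD d l ∈ l := by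
  induction l generalizing d with
  | nil => left; rfl
  | cons x l ih =>
    rcases ih x with h | h
    · right; simp [pvLastD, h]
    · right; simp [pvLastD, h]

lemma pvFold_spec (xs : List Int) (L : List Int) : ∀ (acc : List (List Int)) (j : Int),
    L.foldl
      (fun (st : List (List Int) × Int) i =>
        if PySem.List.pyGetD xs i 0 < PySem.List.pyGetD xs (i+1) 0 then
          (st.1 ++ [PySem.List.slice xs (some st.2) (some (i+1))], i+1)
        else st) (acc, j)
    = (acc ++ (((j :: pvKs xs L).zip (pvKs xs L)).map
        (fun p => PySem.List.slice xs (some p.1) (some p.2))), pvLastD j (pvKs xs L)) := by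
  induction L with
  | nil => intro acc j; simp [pvKs, pvLastD]
  | cons i L ih =>
    intro acc j
    by_cases h : PySem.List.pyGetD xs i 0 < PySem.List.pyGetD xs (i+1) 0
    · simp only [List.foldl_cons, if_pos h]
      rw [ih]
      have hk : pvKs xs (i :: L) = (i+1) :: pvKs xs L := by simp [pvKs, h]
      simp [hk, pvLastD]
    · simp only [List.foldl_cons, if_neg h]
      rw [ih]
      have hk : pvKs xs (i :: L) = pvKs xs L := by simp [pvKs, h]
      simp [hk]

lemma pvZip_tail_append (f : Int × Int → List Int) (c : List Int) : ∀ (j n : Int),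
    (((j :: (c ++ [n])).zip (c ++ [n])).map f)
      = ((j :: c).zip c).map f ++ [f (pvLastD j c, n)] := by
  induction c with
  | nil => intro j n; simp [pvLastD]
  | cons x c ih =>
    intro j n
    simp only [List.cons_append, List.zip_cons_cons, List.map_cons]
    rw [ih x n]
    simp [pvLastD]

lemma pvKs_nonneg' (xs L : List Int) (hL : ∀ i ∈ L, (0:Int) ≤ i) :
    ∀ x ∈ pvKs xs L, (0:Int) ≤ x := by
  intro x hx
  simp only [pvKs, List.mem_filterMap] at hx
  obtain ⟨i, hi, hfi⟩ := hx
  have := hL i hi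
  split at hfi
  · cases hfi; omega
  · cases hfi

lemma pvKs_nonneg (xs : List Int) :
    ∀ x ∈ pvKs xs (PySem.List.pyRange 0 (PySem.List.len xs - 1) 1), (0:Int) ≤ x := by
  apply pvKs_nonneg'
  intro i hi
  rw [PySem.List.mem_pyRange_one] at hi
  omega

lemma pvSlice_from_eq (xs : List Int) (a : Int) (ha : 0 ≤ a) :
    PySem.List.slice xs (some a) none = PySem.List.slice xs (some a) (some (PySem.List.len xs)) := by
  rw [PySem.List.slice_from xs ha, PySem.List.len_eq,
      PySem.List.slice_toNat xs ha (by exact_mod_cast Int.natCast_nonneg xs.length)]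
  rw [List.take_of_length_le]
  simp [List.length_drop]

lemma pvAssemble (xs ks : List Int) (hnn : ∀ x ∈ ks, (0:Int) ≤ x) :
    (((0:Int) :: ks).zip ks).map (fun p => PySem.List.slice xs (some p.1) (some p.2))
        ++ [PySem.List.slice xs (some (pvLastD 0 ks)) none]
      = (((0:Int) :: (ks ++ [PySem.List.len xs])).zip (ks ++ [PySem.List.len xs])).map
          (fun p => PySem.List.slice xs (some p.1) (some p.2)) := by
  have hlast : (0:Int) ≤ pvLastD 0 ks := by
    rcases pvLastD_cases 0 ks with h | h
    · omega
    · exact hnn _ h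
  rw [pvSlice_from_eq xs _ hlast,
      pvZip_tail_append (fun p => PySem.List.slice xs (some p.1) (some p.2)) ks 0 (PySem.List.len xs)]

lemma pvA_eq_Z (xs : List Int) : get_unsorted_groups xs = pvZ xs := by
  unfold get_unsorted_groups pvZ pvCuts
  rw [pvFold_spec]
  exact pvAssemble xs (pvKs xs (PySem.List.pyRange 0 (PySem.List.len xs - 1) 1)) (pvKs_nonneg xs)

-- ---- part Z:  pvZ = pvG ----

lemma pvKs_shift (x : Int) (t L : List Int) (hL : ∀ i ∈ L, (0:Int) ≤ i) :
    pvKs (x :: t) (L.map (· + 1)) = (pvKs t L).map (· + 1) := by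
  unfold pvKs
  rw [List.filterMap_map, List.map_filterMap]
  apply List.filterMap_congr
  intro i hi
  have h0 : (0:Int) ≤ i := hL i hi
  simp only [Function.comp]
  rw [pvGetD_shift x t i h0]
  have : (i + 1 + 1) = (i + 1) + 1 := by ring
  rw [this, pvGetD_shift x t (i+1) (by omega)]
  split <;> simp

lemma pvSlice_zero_one (x : Int) (t : List Int) :
    PySem.List.slice (x :: t) (some 0) (some 1) = [x] := by
  rw [PySem.List.slice_toNat _ (by omega) (by omega)]
  simp

lemma pvSlice_zero_succ (x : Int) (t : List Int) (b : Int) (hb : 0 ≤ b) :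
    PySem.List.slice (x :: t) (some 0) (some (b + 1)) = x :: PySem.List.slice t (some 0) (some b) := by
  rw [PySem.List.slice_toNat _ (by omega) (by omega), PySem.List.slice_toNat _ (by omega) hb]
  have hb1 : (b + 1).toNat = b.toNat + 1 := by omega
  rw [hb1]
  simp

lemma pvZipMap_shift (x : Int) (t l l' : List Int)
    (hl : ∀ a ∈ l, (0:Int) ≤ a) (hl' : ∀ a ∈ l', (0:Int) ≤ a) :
    ((l.map (· + 1)).zip (l'.map (· + 1))).map
        (fun p => PySem.List.slice (x :: t) (some p.1) (some p.2))
      = (l.zip l').map (fun p => PySem.List.slice t (some p.1) (some p.2)) := by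
  rw [List.zip_map, List.map_map]
  apply List.map_congr_left
  intro p hp
  have hm := List.of_mem_zip hp
  simp only [Function.comp, Prod.map]
  exact pvSlice_shift x t p.1 p.2 (hl _ hm.1) (hl' _ hm.2)

lemma pvCuts_nonneg (xs : List Int) : ∀ a ∈ pvCuts xs, (0:Int) ≤ a := by
  intro a ha
  rcases List.mem_append.mp ha with h | h
  · exact pvKs_nonneg xs _ h
  · simp only [List.mem_singleton] at h
    subst h
    rw [PySem.List.len_eq]
    exact_mod_cast Int.natCast_nonneg xs.length

lemma pvCuts_ne_nil (xs : List Int) : pvCuts xs ≠ [] := by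
  simp [pvCuts]

lemma pvCuts_cons (x y : Int) (rest : List Int) :
    pvCuts (x :: y :: rest) = (if x < y then [1] else []) ++ (pvCuts (y :: rest)).map (· + 1) := by
  set t : List Int := y :: rest with ht
  set M : Int := (t.length : Int) with hM
  have hM1 : 1 ≤ M := by simp [hM, ht]
  have hlen1 : PySem.List.len (x :: t) - 1 = M := by
    simp only [PySem.List.len_eq, hM, ht, List.length_cons]; push_cast; ring
  have hlen2 : PySem.List.len t - 1 = M - 1 := by rw [PySem.List.len_eq]
  have hlen3 : PySem.List.len (x :: t) = M + 1 := by
    simp only [PySem.List.len_eq, hM, ht, List.length_cons]; push_cast; ring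
  have hlen4 : PySem.List.len t = M := by rw [PySem.List.len_eq]
  have hr1 : PySem.List.pyRange 0 M 1 = 0 :: PySem.List.pyRange 1 M 1 :=
    PySem.List.pyRange_one_cons (by omega)
  have hr2 : PySem.List.pyRange 1 M 1 = (PySem.List.pyRange 0 (M - 1) 1).map (· + 1) := by
    have h := pvRange_up_shift 0 (M - 1)
    norm_num at h
    exact h
  have hy1 : PySem.List.pyGetD (x :: t) ((0:Int) + 1) 0 = y := by
    rw [pvGetD_shift x t 0 le_rfl, ht, PySem.List.pyGetD_zero_cons]
  have hx0 : PySem.List.pyGetD (x :: t) 0 0 = x := PySem.List.pyGetD_zero_cons x t 0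
  have hLnn : ∀ i ∈ PySem.List.pyRange 0 (M - 1) 1, (0:Int) ≤ i := by
    intro i hi
    rw [PySem.List.mem_pyRange_one] at hi
    omega
  unfold pvCuts
  rw [hlen1, hlen2, hlen3, hlen4, hr1, hr2]
  have hcons : pvKs (x :: t) (0 :: (PySem.List.pyRange 0 (M - 1) 1).map (· + 1))
      = (if x < y then [1] else []) ++ pvKs (x :: t) ((PySem.List.pyRange 0 (M - 1) 1).map (· + 1)) := by
    unfold pvKs
    rw [List.filterMap_cons, hx0, hy1]
    by_cases hxy : x < y
    · simp [hxy]
    · simp [hxy]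
  rw [hcons, pvKs_shift x t _ hLnn]
  by_cases hxy : x < y
  · simp only [if_pos hxy]
    simp [List.map_append]
  · simp only [if_neg hxy]
    simp [List.map_append]

lemma pvZ_cons_of_eq (xs : List Int) (c0 : Int) (c' : List Int) (h : pvCuts xs = c0 :: c') :
    pvZ xs = PySem.List.slice xs (some 0) (some c0)
      :: ((c0 :: c').zip c').map (fun p => PySem.List.slice xs (some p.1) (some p.2)) := by
  unfold pvZ
  rw [h]
  rfl

lemma pvZ_eq_G (xs : List Int) : pvZ xs = pvG xs := by
  induction xs with
  | nil =>
    unfold pvZ pvCuts pvKs pvG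
    rw [PySem.List.pyRange_one_eq_nil (by rw [PySem.List.len_eq]; simp)]
    simp [PySem.List.len_eq, PySem.List.slice]
  | cons x t ih =>
    cases t with
    | nil =>
      unfold pvZ pvCuts pvKs pvG
      rw [PySem.List.pyRange_one_eq_nil (by rw [PySem.List.len_eq]; simp)]
      simp only [List.filterMap_nil, List.nil_append, List.zip_cons_cons, List.zip_nil_right,
        List.map_cons, List.map_nil]
      rw [PySem.List.len_eq]
      simp only [List.length_singleton, Nat.cast_one]
      rw [pvSlice_zero_one]
    | cons y rest =>
      obtain ⟨c0, c', hc⟩ : ∃ c0 c', pvCuts (y :: rest) = c0 :: c' := by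
        cases h : pvCuts (y :: rest) with
        | nil => exact absurd h (pvCuts_ne_nil _)
        | cons a l => exact ⟨a, l, rfl⟩
      have hnn := pvCuts_nonneg (y :: rest)
      have hc0 : (0:Int) ≤ c0 := hnn c0 (by rw [hc]; exact List.mem_cons_self ..)
      have hc' : ∀ a ∈ c', (0:Int) ≤ a := fun a hm => hnn a (by rw [hc]; exact List.mem_cons_of_mem _ hm)
      have hg : pvG (y :: rest) = PySem.List.slice (y :: rest) (some 0) (some c0)
          :: ((c0 :: c').zip c').map (fun p => PySem.List.slice (y :: rest) (some p.1) (some p.2)) :=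
        ih.symm.trans (pvZ_cons_of_eq _ c0 c' hc)
      have hmatch : pvG (x :: y :: rest) = (match pvG (y :: rest) with
            | [] => [[x]]
            | g :: gs => if x < y then [x] :: g :: gs else (x :: g) :: gs) := rfl
      by_cases hxy : x < y
      · have hcx : pvCuts (x :: y :: rest) = 1 :: ((c0 :: c').map (· + 1)) := by
          rw [pvCuts_cons, if_pos hxy, hc]; rfl
        rw [pvZ_cons_of_eq _ _ _ hcx]
        have hmap : ((1 :: (c0 :: c').map (· + 1)).zip ((c0 :: c').map (· + 1)))
            = (((0 :: c0 :: c').map (· + 1)).zip ((c0 :: c').map (· + 1))) := by simp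
        rw [hmap, pvZipMap_shift x (y :: rest) (0 :: c0 :: c') (c0 :: c')
            (by intro a ha
                rcases List.mem_cons.mp ha with h | h
                · omega
                · rw [← hc] at h; exact hnn a h)
            (by intro a ha; rw [← hc] at ha; exact hnn a ha)]
        rw [pvSlice_zero_one, hmatch, hg]
        simp [hxy]
      · have hcx : pvCuts (x :: y :: rest) = (c0 + 1) :: (c'.map (· + 1)) := by
          rw [pvCuts_cons, if_neg hxy, hc]; rfl
        rw [pvZ_cons_of_eq _ _ _ hcx]
        have hmap : (((c0 + 1) :: c'.map (· + 1)).zip (c'.map (· + 1)))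
            = (((c0 :: c').map (· + 1)).zip (c'.map (· + 1))) := by simp
        rw [hmap, pvZipMap_shift x (y :: rest) (c0 :: c') c'
            (by intro a ha; rw [← hc] at ha; exact hnn a ha) hc']
        rw [pvSlice_zero_succ x (y :: rest) c0 hc0, hmatch, hg]
        simp [hxy]

-- ---- part B:  port of B = pvG ----

def pvStepB (xs : List Int) (st : List (List Int) × List Int) (i : Int) : List (List Int) × List Int :=
  if PySem.List.pyGetD xs i 0 < PySem.List.pyGetD xs (i+1) 0 then
    (st.1 ++ [st.2], [PySem.List.pyGetD xs i 0])
  else (st.1, PySem.List.pyGetD xs i 0 :: st.2)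

def pvF (xs : List Int) : List (List Int) × List Int :=
  (PySem.List.pyRange (PySem.List.len xs - 2) (-1) (-1)).foldl (pvStepB xs)
    ([], [PySem.List.pyGetD xs (-1) 0])

lemma pvRange_down_split (a : Int) (ha : 0 ≤ a) :
    PySem.List.pyRange a (-1) (-1) = PySem.List.pyRange a 0 (-1) ++ [0] := by
  rw [PySem.List.pyRange_neg_one_eq_reverse, PySem.List.pyRange_neg_one_eq_reverse]
  norm_num
  rw [PySem.List.pyRange_one_cons (show (0:Int) < a + 1 by omega)]
  simp

lemma pvF_cons (x y : Int) (rest : List Int) :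
    pvF (x :: y :: rest) = pvStepB (x :: y :: rest) (pvF (y :: rest)) 0 := by
  set t : List Int := y :: rest with ht
  set M : Int := (t.length : Int) with hM
  have hM1 : 1 ≤ M := by simp [hM, ht]
  have hlen1 : PySem.List.len (x :: t) - 2 = M - 1 := by
    simp only [PySem.List.len_eq, hM, ht, List.length_cons]; push_cast; ring
  have hlen2 : PySem.List.len t - 2 = M - 2 := by rw [PySem.List.len_eq]
  have hinit : PySem.List.pyGetD (x :: t) (-1) 0 = PySem.List.pyGetD t (-1) 0 := by
    rw [PySem.List.pyGetD_neg_one (x :: t) 0 (by simp),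
        PySem.List.pyGetD_neg_one t 0 (by simp [ht])]
    exact List.getLast_cons _
  have hsplit : PySem.List.pyRange (M - 1) (-1) (-1)
      = (PySem.List.pyRange (M - 2) (-1) (-1)).map (· + 1) ++ [0] := by
    rw [pvRange_down_split (M - 1) (by omega)]
    have h := pvRange_down_shift (M - 2)
    have h2 : M - 2 + 1 = M - 1 := by ring
    rw [h2] at h
    rw [h]
  unfold pvF
  rw [hlen1, hlen2, hsplit, hinit, List.foldl_append, List.foldl_cons, List.foldl_nil,
      List.foldl_map]
  congr 1
  apply PySem.List.foldl_congr_mem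
  intro acc i hi
  rw [PySem.List.mem_pyRange_neg_one] at hi
  unfold pvStepB
  rw [pvGetD_shift x t i (by omega), pvGetD_shift x t (i + 1) (by omega)]

lemma pvF_invariant (xs : List Int) (h : xs ≠ []) :
    (pvF xs).2 :: (pvF xs).1.reverse = pvG xs := by
  induction xs with
  | nil => exact absurd rfl h
  | cons x t ih =>
    cases t with
    | nil =>
      have : pvF [x] = ([], [x]) := by
        unfold pvF
        rw [PySem.List.pyRange_neg_one_eq_nil (by rw [PySem.List.len_eq]; simp)]
        rw [PySem.List.pyGetD_neg_one [x] 0 (by simp)]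
        rfl
      rw [this]
      rfl
    | cons y rest =>
      have ihc := ih (by simp)
      rw [pvF_cons x y rest]
      have hx0 : PySem.List.pyGetD (x :: y :: rest) 0 0 = x := PySem.List.pyGetD_zero_cons ..
      have hy1 : PySem.List.pyGetD (x :: y :: rest) ((0:Int) + 1) 0 = y := by
        rw [pvGetD_shift x (y :: rest) 0 le_rfl, PySem.List.pyGetD_zero_cons]
      have hG : pvG (x :: y :: rest)
          = match pvG (y :: rest) with
            | [] => [[x]]
            | g :: gs => if x < y then [x] :: g :: gs else (x :: g) :: gs := rfl
      unfold pvStepB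
      rw [hx0, hy1, hG, ← ihc]
      by_cases hxy : x < y
      · rw [if_pos hxy]
        simp [hxy]
      · rw [if_neg hxy]
        simp [hxy]

lemma pvB_eq_G (xs : List Int) : get_unsorted_groups_alt xs = pvG xs := by
  by_cases h : xs = []
  · subst h; simp [get_unsorted_groups_alt, pvG]
  · have : get_unsorted_groups_alt xs = ((pvF xs).1 ++ [(pvF xs).2]).reverse := by
      simp only [get_unsorted_groups_alt, if_neg h]
      rfl
    rw [this, List.reverse_append, List.reverse_singleton, List.singleton_append,
        pvF_invariant xs h]

-- ===== VERDICT (by name: the statement is the Claim_ definition above) =====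
theorem get_unsorted_groups_spec : Claim_equal_get_unsorted_groups := by
  intro xs _
  unfold Spec_get_unsorted_groups
  rw [pvA_eq_Z, pvZ_eq_G, pvB_eq_G]
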